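-- pv_equiv track=rewrite | github.com/zuxinqi/nlp_tasks | Relation_Extraction/tagging_scheme_joint_extraction/evaluation_utils.py | transfrom2seq
-- ===== SOURCE A (Python) =====
-- def transfrom2seq(tags):
--     """
--     将传入的序列解析，变为标签搭配下标的形式返回
--     :param tags: 列表 [[0,0,0,0,1,0...],[0,1,0,0,0,0...],.....]
--     :return: res_dict,字典包含标签名及位置,例如:{XXX:[(2,4),(11,14)]}
--     """
--     res_dict = {}
--     for i in range(len(tags)):
--         for j in range(len(tags[i])):
--             if tags[i][j] not in ["O", "I", "[SEP]", "[CLS]", "X"]: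
--                 if tags[i][j][2:] not in res_dict:
--                     res_dict[tags[i][j][2:]] = []
--                 m = i + 1
--                 while m < len(tags) and "I" in tags[m]:
--                     m += 1
--                 res_dict[tags[i][j][2:]].append((i, m))
--     return res_dict
-- ===== SOURCE B (Python) =====
-- def transfrom2seq(tags):
--     """
--     将传入的序列解析，变为标签搭配下标的形式返回
--     :param tags: 列表 [[0,0,0,0,1,0...],[0,1,0,0,0,0...],.....]
--     :return: res_dict,字典包含标签名及位置,例如:{XXX:[(2,4),(11,14)]}
--     """
--     n = len(tags)
--     # nxt[m] = the row index where a run of "I"-containing rows starting at m ends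
--     nxt = [0] * (n + 1)
--     nxt[n] = n
--     for m in range(n - 1, -1, -1):
--         nxt[m] = nxt[m + 1] if "I" in tags[m] else m
--     skip = {"O", "I", "[SEP]", "[CLS]", "X"}
--     res_dict = {}
--     for i, (row, e) in enumerate(zip(tags, nxt[1:])):
--         for t in row:
--             if t not in skip:
--                 res_dict.setdefault(t[2:], []).append((i, e))
--     return res_dict
-- ===== Notes on version B (the rewrite author's own statement) =====
-- stated objective: faster
-- what changed: Instead of re-running the 'while I in tags[m]' scan (itself an O(w) membership test per step) for every qualifying cell, B precomputes each row's forward endpoint in one backward pass over the rows and then emits precomputed (i, end) spans in a single forward pass.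
import Mathlib
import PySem

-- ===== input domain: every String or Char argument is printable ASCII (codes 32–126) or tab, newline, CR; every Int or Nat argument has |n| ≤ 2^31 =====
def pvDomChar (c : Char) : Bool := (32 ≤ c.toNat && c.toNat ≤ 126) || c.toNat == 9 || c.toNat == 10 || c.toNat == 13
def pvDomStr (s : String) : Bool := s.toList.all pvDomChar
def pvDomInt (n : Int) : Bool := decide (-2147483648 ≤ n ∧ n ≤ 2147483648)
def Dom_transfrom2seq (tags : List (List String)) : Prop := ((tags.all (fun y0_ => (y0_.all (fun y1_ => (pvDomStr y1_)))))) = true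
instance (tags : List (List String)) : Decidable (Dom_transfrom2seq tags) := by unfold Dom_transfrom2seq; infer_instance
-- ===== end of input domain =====

-- B replaces A's per-cell rescan of the following rows by a precomputed endpoint
-- array built in one backward pass (objective: faster, asymptotic).


-- ===== PORT A =====
-- the `while m < len(tags) and "I" in tags[m]: m += 1` loop, returning the final m
def pvAWhile (tags : List (List String)) (m : Int) : Int :=
  if h : m < (tags.length : Int) ∧ (PySem.List.pyGetD tags m []).contains "I" then
    pvAWhile tags (m + 1)
  else m
termination_by ((tags.length : Int) - m).toNat
decreasing_by omega

def transfrom2seq (tags : List (List String)) : List (String × List (Int × Int)) :=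
  ((PySem.List.pyRange 0 (tags.length : Int) 1).foldl (fun d i =>
      let row := PySem.List.pyGetD tags i []
      (PySem.List.pyRange 0 (row.length : Int) 1).foldl (fun d j =>
          let t := PySem.List.pyGetD row j ""
          if ["O", "I", "[SEP]", "[CLS]", "X"].contains t then d
          else
            let key := PySem.Str.slice t (some 2) none
            let d := if d.contains key then d else d.insert key ([] : List (Int × Int))
            d.modify key [] (fun l => l ++ [(i, pvAWhile tags (i + 1))])) d)
    PySem.Dict.empty).items

-- ===== PORT B =====
-- backward pass of Source B: pvBNxt rows b = [nxt[b], nxt[b+1], …, nxt[n]] for the suffix `rows` of tags starting at row b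
def pvBNxt : List (List String) → Int → List Int
  | [], b => [b]
  | r :: rs, b =>
      let rest := pvBNxt rs (b + 1)
      (if r.contains "I" then rest.headD 0 else b) :: rest

-- the `for i, (row, e) in enumerate(zip(tags, nxt[1:]))` loop of Source B
def pvBGo : List (List String × Int) → Int → PySem.Dict String (List (Int × Int)) → PySem.Dict String (List (Int × Int))
  | [], _, d => d
  | (row, e) :: rest, i, d =>
      let d := row.foldl (fun d t =>
          if ["O", "I", "[SEP]", "[CLS]", "X"].contains t then d
          else
            let key := PySem.Str.slice t (some 2) none
            (d.setdefault key []).modify key [] (fun l => l ++ [(i, e)])) d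
      pvBGo rest (i + 1) d

def transfrom2seq_alt (tags : List (List String)) : List (String × List (Int × Int)) :=
  let nxt := pvBNxt tags 0
  (pvBGo (tags.zip nxt.tail) 0 PySem.Dict.empty).items

-- ===== PRECONDITION & SPEC =====
def Spec_transfrom2seq (tags : List (List String)) (out : List (String × List (Int × Int))) : Prop := out = transfrom2seq_alt tags
instance (tags : List (List String)) (out : List (String × List (Int × Int))) : Decidable (Spec_transfrom2seq tags out) := by unfold Spec_transfrom2seq; infer_instance

-- ===== CLAIM (what is proved, stated in full; the proofs are below) =====
def Claim_equal_transfrom2seq : Prop := ∀ (tags : List (List String)), Dom_transfrom2seq tags → Spec_transfrom2seq tags (transfrom2seq tags)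

-- ===== LEMMAS AND PROOFS =====

-- the while loop of A equals the head of B's endpoint list for the suffix starting at b
theorem pvAWhile_eq_headD (rs : List (List String)) : ∀ (tags : List (List String)) (b : Int),
    0 ≤ b → tags.drop b.toNat = rs → pvAWhile tags b = (pvBNxt rs b).headD 0 := by
  induction rs with
  | nil =>
      intro tags b hb hdrop
      have hlen : tags.length ≤ b.toNat := by
        by_contra h
        have := List.drop_eq_nil_iff.mp hdrop
        omega
      rw [pvAWhile]
      have hnc : ¬ (b < (tags.length : Int) ∧ (PySem.List.pyGetD tags b []).contains "I" = true) := by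
        rintro ⟨h1, _⟩; omega
      rw [dif_neg hnc]
      simp [pvBNxt]
  | cons r rs ih =>
      intro tags b hb hdrop
      have hlt : b.toNat < tags.length := by
        have h := congrArg List.length hdrop
        simp at h; omega
      have hcd := (List.getElem_cons_drop (as := tags) (i := b.toNat) hlt).trans hdrop
      have hget : PySem.List.pyGetD tags b [] = r := by
        rw [PySem.List.pyGetD_eq_getElem tags ([] : List String) hb (by omega)]
        exact (List.cons.injEq _ _ _ _ ▸ hcd).1
      have hdrop' : tags.drop (b + 1).toNat = rs := by
        have h1 : (b + 1).toNat = b.toNat + 1 := by omega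
        rw [h1]
        exact (List.cons.injEq _ _ _ _ ▸ hcd).2
      rw [pvAWhile]
      by_cases hI : r.contains "I"
      · have hcond : b < (tags.length : Int) ∧ (PySem.List.pyGetD tags b []).contains "I" := by
          refine ⟨by omega, by rw [hget]; exact hI⟩
        rw [dif_pos hcond]
        rw [ih tags (b + 1) (by omega) hdrop']
        simp only [pvBNxt, List.headD_cons, if_pos hI]
      · have hcond : ¬ (b < (tags.length : Int) ∧ (PySem.List.pyGetD tags b []).contains "I") := by
          rintro ⟨_, h2⟩; rw [hget] at h2; exact hI h2
        rw [dif_neg hcond]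
        simp only [pvBNxt, List.headD_cons, if_neg hI]

-- A's per-cell dict update ("if key not in d: d[key] = []" then append) IS setdefault-then-append
theorem pvStep_eq (d : PySem.Dict String (List (Int × Int))) (t : String) (i e : Int) :
    (if ["O", "I", "[SEP]", "[CLS]", "X"].contains t then d
     else
       let key := PySem.Str.slice t (some 2) none
       let d := if d.contains key then d else d.insert key ([] : List (Int × Int))
       d.modify key [] (fun l => l ++ [(i, e)]))
    = (if ["O", "I", "[SEP]", "[CLS]", "X"].contains t then d
       else
         let key := PySem.Str.slice t (some 2) none
         (d.setdefault key []).modify key [] (fun l => l ++ [(i, e)])) := by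
  by_cases hskip : (["O", "I", "[SEP]", "[CLS]", "X"].contains t) = true
  · rw [if_pos hskip, if_pos hskip]
  · rw [if_neg hskip, if_neg hskip]
    by_cases hc : d.contains (PySem.Str.slice t (some 2) none) = true
    · simp only [hc, if_true, PySem.Dict.setdefault_of_contains d ([] : List (Int × Int)) hc]
    · simp only [hc, if_false, Bool.false_eq_true,
        PySem.Dict.setdefault_of_not_contains d ([] : List (Int × Int)) (by simpa using hc)]

-- main loop correspondence: A's indexed outer loop over rows b.. equals B's pvBGo on the zipped suffix
theorem pvLoop_eq (rs : List (List String)) : ∀ (tags : List (List String)) (b : Int)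
    (d : PySem.Dict String (List (Int × Int))), 0 ≤ b → tags.drop b.toNat = rs →
    (PySem.List.pyRange b (tags.length : Int) 1).foldl (fun d i =>
        let row := PySem.List.pyGetD tags i []
        (PySem.List.pyRange 0 (row.length : Int) 1).foldl (fun d j =>
            let t := PySem.List.pyGetD row j ""
            if ["O", "I", "[SEP]", "[CLS]", "X"].contains t then d
            else
              let key := PySem.Str.slice t (some 2) none
              let d := if d.contains key then d else d.insert key ([] : List (Int × Int))
              d.modify key [] (fun l => l ++ [(i, pvAWhile tags (i + 1))])) d) d
    = pvBGo (rs.zip (pvBNxt rs b).tail) b d := by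
  induction rs with
  | nil =>
      intro tags b d hb hdrop
      have hlen : tags.length ≤ b.toNat := by
        by_contra h
        have := List.drop_eq_nil_iff.mp hdrop
        omega
      rw [PySem.List.pyRange_one_eq_nil (by omega)]
      simp [pvBNxt, pvBGo]
  | cons r rs ih =>
      intro tags b d hb hdrop
      have hlt : b.toNat < tags.length := by
        have h := congrArg List.length hdrop
        simp at h; omega
      have hcd := (List.getElem_cons_drop (as := tags) (i := b.toNat) hlt).trans hdrop
      have hget : PySem.List.pyGetD tags b [] = r := by
        rw [PySem.List.pyGetD_eq_getElem tags ([] : List String) hb (by omega)]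
        exact (List.cons.injEq _ _ _ _ ▸ hcd).1
      have hdrop' : tags.drop (b + 1).toNat = rs := by
        have h1 : (b + 1).toNat = b.toNat + 1 := by omega
        rw [h1]
        exact (List.cons.injEq _ _ _ _ ▸ hcd).2
      rw [PySem.List.pyRange_one_cons (by omega), List.foldl_cons]
      -- rewrite the first outer step into B's row step
      have hrow :
          (let row := PySem.List.pyGetD tags b []
           (PySem.List.pyRange 0 (row.length : Int) 1).foldl (fun d j =>
              let t := PySem.List.pyGetD row j ""
              if ["O", "I", "[SEP]", "[CLS]", "X"].contains t then d
              else
                let key := PySem.Str.slice t (some 2) none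
                let d := if d.contains key then d else d.insert key ([] : List (Int × Int))
                d.modify key [] (fun l => l ++ [(b, pvAWhile tags (b + 1))])) d)
          = r.foldl (fun d t =>
              if ["O", "I", "[SEP]", "[CLS]", "X"].contains t then d
              else
                let key := PySem.Str.slice t (some 2) none
                (d.setdefault key []).modify key [] (fun l => l ++ [(b, (pvBNxt rs (b + 1)).headD 0)])) d := by
        rw [hget, pvAWhile_eq_headD rs tags (b + 1) (by omega) hdrop']
        dsimp only
        rw [PySem.List.foldl_pyRange_zero_pyGetD' r ""
          (fun d t =>
            if ["O", "I", "[SEP]", "[CLS]", "X"].contains t then d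
            else
              (if d.contains (PySem.Str.slice t (some 2) none) then d
               else d.insert (PySem.Str.slice t (some 2) none) ([] : List (Int × Int))).modify
                (PySem.Str.slice t (some 2) none) [] (fun l => l ++ [(b, (pvBNxt rs (b + 1)).headD 0)])) d]
        apply PySem.List.foldl_congr_mem
        intro d' t _
        exact pvStep_eq d' t b ((pvBNxt rs (b + 1)).headD 0)
      rw [hrow, ih tags (b + 1) _ (by omega) hdrop']
      have hne : pvBNxt rs (b + 1) ≠ [] := by cases rs <;> simp [pvBNxt]
      have htail : (pvBNxt (r :: rs) b).tail = pvBNxt rs (b + 1) := by simp [pvBNxt]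
      have hcons : pvBNxt rs (b + 1) = (pvBNxt rs (b + 1)).headD 0 :: (pvBNxt rs (b + 1)).tail := by
        cases h : pvBNxt rs (b + 1) with
        | nil => exact absurd h hne
        | cons x xs => simp
      conv_rhs => rw [htail, hcons, List.zip_cons_cons]
      simp only [pvBGo]

-- ===== VERDICT (by name: the statement is the Claim_ definition above) =====
theorem transfrom2seq_spec : Claim_equal_transfrom2seq := by
  intro tags _
  unfold Spec_transfrom2seq transfrom2seq transfrom2seq_alt
  rw [pvLoop_eq tags tags 0 PySem.Dict.empty le_rfl (by simp)]
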